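-- pv_equiv track=rewrite | github.com/joeljose/SkyCop | skycop/analysis/altitude_trace.py | _period_estimate
-- ===== SOURCE A (Python) =====
-- from collections import Counter
--
-- def _period_estimate(crossings: list[int]) -> dict:
--     if len(crossings) < 2:
--         return {"n_crossings": len(crossings)}
--     gaps = [crossings[i] - crossings[i - 1] for i in range(1, len(crossings))]
--     # 2 crossings per full cycle → period ≈ 2 × median gap
--     gap_counter = Counter(gaps)
--     most_common_gap, most_common_n = gap_counter.most_common(1)[0]
--     gaps.sort()
--     median_gap = gaps[len(gaps) // 2]
--     return {
--         "n_crossings": len(crossings),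
--         "median_half_period_ticks": median_gap,
--         "estimated_full_period_ticks": 2 * median_gap,
--         "modal_half_period_ticks": most_common_gap,
--         "modal_half_period_count": most_common_n,
--     }
-- ===== SOURCE B (Python) =====
-- def _select(xs, k):
--     """k-th smallest element of xs (0-based) by quickselect; no sorting."""
--     p = xs[0]
--     less = [x for x in xs if x < p]
--     if k < len(less):
--         return _select(less, k)
--     n_le = len(less) + xs.count(p)
--     if k < n_le:
--         return p
--     return _select([x for x in xs if x > p], k - n_le)
--
-- def _period_estimate(crossings: list[int]) -> dict:
--     n = len(crossings)
--     if n < 2: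
--         return {"n_crossings": n}
--     gaps = [b - a for a, b in zip(crossings, crossings[1:])]
--     counts = {}
--     for g in gaps:
--         counts[g] = counts.get(g, 0) + 1
--     mode_gap, mode_n = max(counts.items(), key=lambda kv: kv[1])
--     median_gap = _select(gaps, len(gaps) // 2)
--     return {
--         "n_crossings": n,
--         "median_half_period_ticks": median_gap,
--         "estimated_full_period_ticks": 2 * median_gap,
--         "modal_half_period_ticks": mode_gap,
--         "modal_half_period_count": mode_n,
--     }
-- ===== Notes on version B (the rewrite author's own statement) =====
-- stated objective: alternative
-- what changed: replaces sorting the gap list and indexing its middle by a quickselect of the len//2-th order statistic (plus a plain counting dict scanned once for the mode), so no sort is performed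
import Mathlib
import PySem

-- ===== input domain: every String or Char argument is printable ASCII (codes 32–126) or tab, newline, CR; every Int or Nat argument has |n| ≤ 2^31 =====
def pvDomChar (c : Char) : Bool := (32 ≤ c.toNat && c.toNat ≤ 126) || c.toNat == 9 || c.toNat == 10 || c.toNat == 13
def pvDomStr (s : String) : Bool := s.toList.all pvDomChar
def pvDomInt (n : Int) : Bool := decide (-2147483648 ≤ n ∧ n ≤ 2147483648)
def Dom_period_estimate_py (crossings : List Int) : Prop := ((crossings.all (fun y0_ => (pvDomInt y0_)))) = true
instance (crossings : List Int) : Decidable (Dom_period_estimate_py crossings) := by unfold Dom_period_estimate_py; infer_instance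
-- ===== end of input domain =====

-- B replaces sorting the gap list and indexing its middle by a quickselect of the
-- len//2-th order statistic (and a plain counting dict for the mode); no sort is performed
-- (objective: alternative algorithm).


-- ===== PORT A =====
-- Counter.most_common(1)[0] = the first pair with maximal count (heapq.nlargest(1) is
-- max(items, key=count)); the [0] never fails — the counter is built from a nonempty
-- list — so the .getD (0, 0) default is never used.
def period_estimate_py (crossings : List Int) : List (String × Int) :=
  if crossings.length < 2 then
    [("n_crossings", (crossings.length : Int))]
  else
    let gaps := (PySem.List.pyRange 1 (crossings.length : Int) 1).map
      (fun i => PySem.List.pyGetD crossings i 0 - PySem.List.pyGetD crossings (i - 1) 0)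
    let gapCounter := PySem.Dict.counter gaps
    let mc := (PySem.List.max? gapCounter.items (fun p => p.2)).getD (0, 0)
    let sortedGaps := PySem.List.sorted gaps (fun x => x) false
    let medianGap := PySem.List.pyGetD sortedGaps (PySem.Int.floordiv (gaps.length : Int) 2) 0
    [("n_crossings", (crossings.length : Int)),
     ("median_half_period_ticks", medianGap),
     ("estimated_full_period_ticks", 2 * medianGap),
     ("modal_half_period_ticks", mc.1),
     ("modal_half_period_count", mc.2)]

-- ===== PORT B =====
-- quickselect with first-element pivot: the k-th smallest element of xs; the [] case
-- (Python: IndexError) is unreachable from the call below, where k < xs.length always holds.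
def pySelect : List Int → Nat → Int
  | [], _ => 0
  | p :: rest, k =>
    let less := (p :: rest).filter (fun x => decide (x < p))
    if k < less.length then pySelect less k
    else
      let nle := less.length + PySem.List.count (p :: rest) p
      if k < nle then p
      else pySelect ((p :: rest).filter (fun x => decide (p < x))) (k - nle)
termination_by xs _ => xs.length
decreasing_by
  · have h : (p :: rest).filter (fun x => decide (x < p)) = rest.filter (fun x => decide (x < p)) := by
      simp
    rw [h]; exact Nat.lt_succ_of_le (List.length_filter_le _ _)
  · have h : (p :: rest).filter (fun x => decide (p < x)) = rest.filter (fun x => decide (p < x)) := by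
      simp
    rw [h]; exact Nat.lt_succ_of_le (List.length_filter_le _ _)

-- max(counts.items(), key=...) raises only on an empty dict, never reached here:
-- the .getD (0, 0) default is never used.
def period_estimate_py_alt (crossings : List Int) : List (String × Int) :=
  if crossings.length < 2 then
    [("n_crossings", (crossings.length : Int))]
  else
    let gaps := (crossings.zip (PySem.List.slice crossings (some 1) none)).map (fun p => p.2 - p.1)
    let counts := gaps.foldl (fun d g => d.insert g (d.getD g 0 + 1)) PySem.Dict.empty
    let mc := (PySem.List.max? counts.items (fun kv => kv.2)).getD (0, 0)
    let medianGap := pySelect gaps (gaps.length / 2)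
    [("n_crossings", (crossings.length : Int)),
     ("median_half_period_ticks", medianGap),
     ("estimated_full_period_ticks", 2 * medianGap),
     ("modal_half_period_ticks", mc.1),
     ("modal_half_period_count", mc.2)]

-- ===== PRECONDITION & SPEC =====
def Spec_period_estimate_py (crossings : List Int) (out : List (String × Int)) : Prop := out = period_estimate_py_alt crossings
instance (crossings : List Int) (out : List (String × Int)) : Decidable (Spec_period_estimate_py crossings out) := by unfold Spec_period_estimate_py; infer_instance

-- ===== CLAIM (what is proved, stated in full; the proofs are below) =====
def Claim_equal_period_estimate_py : Prop := ∀ (crossings : List Int), Dom_period_estimate_py crossings → Spec_period_estimate_py crossings (period_estimate_py crossings)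

-- ===== LEMMAS AND PROOFS =====

lemma gaps_aux (xs : List Int) :
    (List.range (xs.length - 1)).map (fun k => xs.getD (k+1) 0 - xs.getD k 0)
    = (xs.zip (xs.drop 1)).map (fun p => p.2 - p.1) := by
  induction xs with
  | nil => simp
  | cons x t ih =>
    cases t with
    | nil => simp
    | cons y t' =>
      have hr : List.range ((x :: y :: t').length - 1) = 0 :: (List.range ((y :: t').length - 1)).map Nat.succ := by
        simp [List.range_succ_eq_map]
      rw [hr]
      rw [show ((x :: y :: t').zip ((x :: y :: t').drop 1)) = (x, y) :: ((y :: t').zip ((y :: t').drop 1)) by simp]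
      simp only [List.map_cons, List.map_map]
      refine congrArg₂ List.cons rfl ?_
      rw [← ih]
      apply List.map_congr_left
      intro k _
      simp [Nat.succ_eq_add_one, Function.comp]

lemma gaps_range_eq_zip (xs : List Int) :
    (PySem.List.pyRange 1 (xs.length : Int) 1).map
      (fun i => PySem.List.pyGetD xs i 0 - PySem.List.pyGetD xs (i - 1) 0)
    = (xs.zip (PySem.List.slice xs (some 1) none)).map (fun p => p.2 - p.1) := by
  rw [PySem.List.slice_from xs (show (0:Int) ≤ 1 by norm_num), PySem.List.pyRange_one]
  simp only [Int.toNat_one]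
  rw [show ((xs.length : Int) - 1).toNat = xs.length - 1 by omega]
  rw [← gaps_aux]
  simp only [List.map_map]
  apply List.map_congr_left
  intro k _
  simp only [Function.comp]
  rw [show (1 : Int) + (k : Int) = ((k + 1 : Nat) : Int) by push_cast; ring]
  rw [show ((k+1 : Nat) : Int) - 1 = ((k : Nat) : Int) by push_cast; ring]
  rw [PySem.List.pyGetD_natCast, PySem.List.pyGetD_natCast]

lemma partition3_perm (p : Int) (xs : List Int) :
    (xs.filter (fun x => decide (x < p)) ++ xs.filter (fun x => decide (x = p))
      ++ xs.filter (fun x => decide (p < x))).Perm xs := by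
  induction xs with
  | nil => simp
  | cons y t ih =>
    rcases lt_trichotomy y p with h | h | h
    · simpa [List.filter_cons, h, not_lt_of_gt h, h.ne, (by omega : ¬ p < y)] using ih.cons y
    · subst h
      have e1 : ((y :: t).filter (fun x => decide (x < y)) ++ (y :: t).filter (fun x => decide (x = y))
          ++ (y :: t).filter (fun x => decide (y < x)))
          = t.filter (fun x => decide (x < y)) ++ (y :: (t.filter (fun x => decide (x = y))
            ++ t.filter (fun x => decide (y < x)))) := by
        simp
      rw [e1]
      exact List.perm_middle.trans (List.Perm.cons y (by simpa using ih))
    · have e1 : ((y :: t).filter (fun x => decide (x < p)) ++ (y :: t).filter (fun x => decide (x = p))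
          ++ (y :: t).filter (fun x => decide (p < x)))
          = (t.filter (fun x => decide (x < p)) ++ t.filter (fun x => decide (x = p)))
            ++ (y :: t.filter (fun x => decide (p < x))) := by
        simp [List.filter_cons, h, if_neg (by omega : ¬ y < p), if_neg (by omega : ¬ y = p)]
      rw [e1]
      exact List.perm_middle.trans (List.Perm.cons y (by simpa using ih))

-- the Python-sorted list is the sorted less-part, then the equal-part, then the sorted greater-part
lemma sorted_partition (p : Int) (xs : List Int) :
    PySem.List.sorted xs (fun x => x) false
      = PySem.List.sorted (xs.filter (fun x => decide (x < p))) (fun x => x) false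
        ++ xs.filter (fun x => decide (x = p))
        ++ PySem.List.sorted (xs.filter (fun x => decide (p < x))) (fun x => x) false := by
  apply PySem.List.sorted_id_eq_of_perm_of_pairwise
  · exact (((PySem.List.sorted_perm _ _ _).append (List.Perm.refl _)).append
      (PySem.List.sorted_perm _ _ _)).trans (partition3_perm p xs)
  · rw [List.pairwise_append, List.pairwise_append]
    refine ⟨⟨PySem.List.sorted_pairwise _ _, ?_, ?_⟩, PySem.List.sorted_pairwise _ _, ?_⟩
    · apply List.pairwise_of_forall_mem_list
      intro a ha b hb
      have := List.of_mem_filter ha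
      have := List.of_mem_filter hb
      simp_all
    · intro a ha b hb
      have ha' := List.of_mem_filter ((PySem.List.mem_sorted _ _ _ _).1 ha)
      have hb' := List.of_mem_filter hb
      simp at ha' hb'; omega
    · intro a ha b hb
      rcases List.mem_append.1 ha with h1 | h1
      · have ha' := List.of_mem_filter ((PySem.List.mem_sorted _ _ _ _).1 h1)
        have hb' := List.of_mem_filter ((PySem.List.mem_sorted _ _ _ _).1 hb)
        simp at ha' hb'; omega
      · have ha' := List.of_mem_filter h1
        have hb' := List.of_mem_filter ((PySem.List.mem_sorted _ _ _ _).1 hb)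
        simp at ha' hb'; omega

lemma pySelect_eq_sorted_aux : ∀ (n : Nat) (xs : List Int) (k : Nat), xs.length ≤ n → k < xs.length →
    pySelect xs k = (PySem.List.sorted xs (fun x => x) false).getD k 0 := by
  intro n
  induction n with
  | zero => intro xs k h hk; omega
  | succ n ih =>
    intro xs k hn hk
    match xs with
    | [] => simp at hk
    | p :: rest =>
      have hAlen : ((p :: rest).filter (fun x => decide (x < p))).length < (p :: rest).length := by
        rw [show (p :: rest).filter (fun x => decide (x < p)) = rest.filter (fun x => decide (x < p)) by simp]
        exact Nat.lt_succ_of_le (List.length_filter_le _ _)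
      have hGlen : ((p :: rest).filter (fun x => decide (p < x))).length < (p :: rest).length := by
        rw [show (p :: rest).filter (fun x => decide (p < x)) = rest.filter (fun x => decide (p < x)) by simp]
        exact Nat.lt_succ_of_le (List.length_filter_le _ _)
      have hsum : ((p :: rest).filter (fun x => decide (x < p))).length
          + ((p :: rest).filter (fun x => decide (x = p))).length
          + ((p :: rest).filter (fun x => decide (p < x))).length = (p :: rest).length := by
        have h := (partition3_perm p (p :: rest)).length_eq
        simpa only [List.length_append] using h
      have hcount : PySem.List.count (p :: rest) p
          = ((p :: rest).filter (fun x => decide (x = p))).length := by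
        rw [PySem.List.count_eq, List.count_eq_countP, List.countP_eq_length_filter]
        apply congrArg List.length
        apply List.filter_congr
        intro x _
        by_cases h : x = p <;> simp [h]
      have hsp := sorted_partition p (p :: rest)
      simp only [pySelect, hcount]
      split_ifs with h1 h2
      · rw [hsp]
        rw [List.getD_append _ _ _ _ (by
          simp only [List.length_append, PySem.List.length_sorted]; omega)]
        rw [List.getD_append _ _ _ _ (by simp only [PySem.List.length_sorted]; omega)]
        exact ih _ k (by omega) (by omega)
      · rw [hsp]
        rw [List.getD_append _ _ _ _ (by
          simp only [List.length_append, PySem.List.length_sorted]; omega)]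
        rw [List.getD_append_right _ _ _ _ (by simp only [PySem.List.length_sorted]; omega)]
        rw [PySem.List.length_sorted]
        have hlt : k - ((p :: rest).filter (fun x => decide (x < p))).length
            < ((p :: rest).filter (fun x => decide (x = p))).length := by omega
        rw [List.getD_eq_getElem _ _ hlt]
        have hm := List.getElem_mem (l := (p :: rest).filter (fun x => decide (x = p))) hlt
        have := List.of_mem_filter hm
        simp only [decide_eq_true_eq] at this
        exact this.symm
      · rw [hsp]
        rw [List.getD_append_right _ _ _ _ (by
          simp only [List.length_append, PySem.List.length_sorted]; omega)]
        rw [ih _ (k - (((p :: rest).filter (fun x => decide (x < p))).length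
              + ((p :: rest).filter (fun x => decide (x = p))).length)) (by omega) (by omega)]
        congr 1
        simp only [List.length_append, PySem.List.length_sorted]

theorem period_estimate_py_spec : Claim_equal_period_estimate_py := by
  intro crossings _
  unfold Spec_period_estimate_py period_estimate_py period_estimate_py_alt
  by_cases h : crossings.length < 2
  · rw [if_pos h, if_pos h]
  · rw [if_neg h, if_neg h]
    simp only [gaps_range_eq_zip, PySem.Dict.foldl_insert_getD_add_one_eq_counter]
    have hglen : ((crossings.zip (PySem.List.slice crossings (some 1) none)).map
        (fun p => p.2 - p.1)).length = crossings.length - 1 := by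
      rw [List.length_map, List.length_zip, PySem.List.slice_from crossings (show (0:Int) ≤ 1 by norm_num)]
      simp only [Int.toNat_one, List.length_drop]
      omega
    have hmed : PySem.List.pyGetD
        (PySem.List.sorted ((crossings.zip (PySem.List.slice crossings (some 1) none)).map
          (fun p => p.2 - p.1)) (fun x => x) false)
        (PySem.Int.floordiv ((((crossings.zip (PySem.List.slice crossings (some 1) none)).map
          (fun p => p.2 - p.1)).length : Nat) : Int) 2) 0
        = pySelect ((crossings.zip (PySem.List.slice crossings (some 1) none)).map
          (fun p => p.2 - p.1)) ((((crossings.zip (PySem.List.slice crossings (some 1) none)).map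
          (fun p => p.2 - p.1)).length) / 2) := by
      rw [show (2:Int) = ((2:Nat):Int) by norm_num, PySem.Int.floordiv_natCast,
        PySem.List.pyGetD_natCast]
      rw [pySelect_eq_sorted_aux ((crossings.zip (PySem.List.slice crossings (some 1) none)).map
          (fun p => p.2 - p.1)).length _ _ (le_refl _) (by omega)]
    rw [hmed]
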